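-- pv_equiv track=rewrite | github.com/remowxdx/AoC-2019 | aoc04.py | check_part_1
-- ===== SOURCE A (Python) =====
-- def get_digits(n):
--     digits = []
--     i = n
--     while i > 0:
--         digits.append(i % 10)
--         i = i // 10
--     digits.reverse()
--     return digits
--
-- def check_part_1(i):
--     digits = get_digits(i)
--     l = 0
--     adj = False
--     for d in digits:
--
--         # digits should be in ascending order
--         if d < l:
--             return False
--
--         # At least 2 equal adjacent digits
--         if d == l:
--             adj = True
--
--         l = d
--     return adj
-- ===== SOURCE B (Python) =====
-- def get_digits(n):
--     digits = []
--     i = n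
--     while i > 0:
--         digits.append(i % 10)
--         i = i // 10
--     digits.reverse()
--     return digits
--
-- def check_part_1(i):
--     digits = get_digits(i)
--     return digits == sorted(digits) and any(x == y for x, y in zip(digits, digits[1:]))
-- ===== Notes on version B (the rewrite author's own statement) =====
-- stated objective: simpler
-- what changed: Replaces A's fused single-pass state machine (tracking last digit and an adjacency flag with an early return) by two declarative checks: digits == sorted(digits) for ascending order and a zip(digits, digits[1:]) scan for an adjacent equal pair, reusing A's exact digit extraction.
import Mathlib
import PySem

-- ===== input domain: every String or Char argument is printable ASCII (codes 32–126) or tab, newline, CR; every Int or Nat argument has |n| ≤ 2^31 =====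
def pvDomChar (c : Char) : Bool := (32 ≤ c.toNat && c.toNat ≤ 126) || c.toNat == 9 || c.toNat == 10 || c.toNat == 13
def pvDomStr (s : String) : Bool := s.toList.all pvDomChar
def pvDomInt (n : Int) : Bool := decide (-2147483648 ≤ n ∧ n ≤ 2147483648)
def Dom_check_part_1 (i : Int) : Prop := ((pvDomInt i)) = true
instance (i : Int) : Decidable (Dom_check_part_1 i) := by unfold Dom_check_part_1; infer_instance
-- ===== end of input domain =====

-- B replaces A's fused single-pass state machine (last digit + adjacency flag with early
-- return) by two declarative checks: digits == sorted(digits) and an adjacent-pair scan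
-- over zip(digits, digits[1:]); objective: simpler.

-- ===== PORT A =====
-- while i > 0: digits.append(i % 10); i = i // 10
def get_digits_loop (i : Int) (digits : List Int) : List Int :=
  if _h : i > 0 then
    get_digits_loop (PySem.Int.floordiv i 10) (digits ++ [PySem.Int.mod i 10])
  else digits
termination_by i.toNat
decreasing_by
  rw [PySem.Int.floordiv_eq_ediv_of_pos (by omega : (0:Int) < 10)]
  omega

def get_digits (n : Int) : List Int :=
  (get_digits_loop n []).reverse

-- the for-loop over digits, state (l, adj), early 'return False'
def check_loop : List Int → Int → Bool → Bool
  | [], _, adj => adj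
  | d :: ds, l, adj =>
      if d < l then false
      else check_loop ds d (if d == l then true else adj)

def check_part_1 (i : Int) : Bool :=
  check_loop (get_digits i) 0 false

-- ===== PORT B =====
def get_digits_alt_loop (i : Int) (digits : List Int) : List Int :=
  if _h : i > 0 then
    get_digits_alt_loop (PySem.Int.floordiv i 10) (digits ++ [PySem.Int.mod i 10])
  else digits
termination_by i.toNat
decreasing_by
  rw [PySem.Int.floordiv_eq_ediv_of_pos (by omega : (0:Int) < 10)]
  omega

def get_digits_alt (n : Int) : List Int :=
  (get_digits_alt_loop n []).reverse

-- digits == sorted(digits) and any(x == y for x, y in zip(digits, digits[1:]))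
-- (digits[1:] on a list is List.drop 1 — exact for index 1 ≥ 0)
def check_part_1_alt (i : Int) : Bool :=
  let digits := get_digits_alt i
  decide (digits = PySem.List.sorted digits (fun x => x) false) &&
    (digits.zip (digits.drop 1)).any (fun p => p.1 == p.2)

-- ===== PRECONDITION & SPEC =====
def Spec_check_part_1 (i : Int) (out : Bool) : Prop := out = check_part_1_alt i
instance (i : Int) (out : Bool) : Decidable (Spec_check_part_1 i out) := by unfold Spec_check_part_1; infer_instance

-- ===== CLAIM (what is proved, stated in full; the proofs are below) =====
def Claim_equal_check_part_1 : Prop := ∀ (i : Int), Dom_check_part_1 i → Spec_check_part_1 i (check_part_1 i)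

-- ===== LEMMAS AND PROOFS =====

-- Bool adjacency scan starting from a previous digit l
def adjEq : Int → List Int → Bool
  | _, [] => false
  | l, d :: ds => (l == d) || adjEq d ds

-- Bool ascending-from-l scan
def ascFrom : Int → List Int → Bool
  | _, [] => true
  | l, d :: ds => if d < l then false else ascFrom d ds

lemma zip_drop_eq_adjEq : ∀ (h : Int) (t : List Int),
    ((h :: t).zip t).any (fun p => p.1 == p.2) = adjEq h t := by
  intro h t
  induction t generalizing h with
  | nil => rfl
  | cons d ds ih => simp [adjEq, ← ih d, List.any_cons]

-- A's loop characterised: ascending check && (adj || adjacency scan)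
lemma check_loop_eq : ∀ (ds : List Int) (l : Int) (adj : Bool),
    check_loop ds l adj = (ascFrom l ds && (adj || adjEq l ds)) := by
  intro ds
  induction ds with
  | nil => intro l adj; simp [check_loop, ascFrom, adjEq]
  | cons d ds ih =>
      intro l adj
      simp only [check_loop, ascFrom, adjEq]
      by_cases hlt : d < l
      · simp [hlt]
      · rw [if_neg hlt, if_neg hlt, ih]
        by_cases heq : d = l
        · subst heq; cases adj <;> simp
        · have h2 : (l == d) = false := by simp; omega
          simp [heq, h2]

lemma ascFrom_iff_pairwise : ∀ (ds : List Int) (l : Int),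
    ascFrom l ds = true ↔ (l :: ds).Pairwise (· ≤ ·) := by
  intro ds
  induction ds with
  | nil => intro l; simp [ascFrom]
  | cons d ds ih =>
      intro l
      rw [show ascFrom l (d :: ds) = if d < l then false else ascFrom d ds from rfl]
      by_cases hlt : d < l
      · simp only [if_pos hlt]
        constructor
        · intro h; cases h
        · intro h
          have hld : l ≤ d := List.rel_of_pairwise_cons h (by simp : d ∈ d :: ds)
          omega
      · simp only [if_neg hlt, ih d]
        constructor
        · intro h
          rw [List.pairwise_cons]
          refine ⟨?_, h⟩
          intro y hy
          rcases List.mem_cons.mp hy with rfl | hy'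
          · omega
          · have := List.rel_of_pairwise_cons h hy'
            omega
        · intro h
          exact (List.pairwise_cons.mp h).2

-- the loop output: appended digits are nonnegative, and when 0 < i its reverse starts
-- with a positive digit (the most significant one)
lemma loop_spec : ∀ (n : Nat) (i : Int), i.toNat ≤ n → ∀ acc,
    ∃ t, get_digits_loop i acc = acc ++ t ∧ (∀ d ∈ t, 0 ≤ d) ∧
      (0 < i → ∃ h r, t.reverse = h :: r ∧ 0 < h) := by
  intro n
  induction n with
  | zero =>
      intro i hi acc
      refine ⟨[], ?_, by simp, by omega⟩
      rw [get_digits_loop]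
      simp [show ¬ i > 0 by omega]
  | succ n ih =>
      intro i hi acc
      by_cases hpos : i > 0
      · have hd : PySem.Int.floordiv i 10 = i / 10 :=
          PySem.Int.floordiv_eq_ediv_of_pos (by omega)
        have hm : PySem.Int.mod i 10 = i % 10 :=
          PySem.Int.mod_eq_emod_of_pos (by omega)
        have hstep : get_digits_loop i acc
            = get_digits_loop (i / 10) (acc ++ [i % 10]) := by
          rw [get_digits_loop, dif_pos hpos, hd, hm]
        have hle : (i / 10).toNat ≤ n := by omega
        obtain ⟨t, ht, hnn, hrev⟩ := ih (i / 10) hle (acc ++ [i % 10])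
        refine ⟨i % 10 :: t, ?_, ?_, ?_⟩
        · rw [hstep, ht]; simp
        · intro d hd'
          rw [List.mem_cons] at hd'
          rcases hd' with rfl | hmem
          · omega
          · exact hnn d hmem
        · intro _
          by_cases hq : 0 < i / 10
          · obtain ⟨h, r, hr, hhp⟩ := hrev hq
            exact ⟨h, r ++ [i % 10], by simp [hr], hhp⟩
          · have ht0 : t = [] := by
              have hgl : get_digits_loop (i / 10) (acc ++ [i % 10]) = acc ++ [i % 10] := by
                rw [get_digits_loop]
                simp [show ¬ i / 10 > 0 by omega]
              have := ht.symm.trans hgl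
              simpa using this
            refine ⟨i % 10, [], by simp [ht0], by omega⟩
      · refine ⟨[], ?_, by simp, by omega⟩
        rw [get_digits_loop]
        simp [hpos]

lemma get_digits_spec (i : Int) :
    (∀ d ∈ get_digits i, 0 ≤ d) ∧
      (0 < i → ∃ h r, get_digits i = h :: r ∧ 0 < h) := by
  obtain ⟨t, ht, hnn, hrev⟩ := loop_spec i.toNat i le_rfl []
  have hgd : get_digits i = t.reverse := by rw [get_digits, ht]; simp
  rw [hgd]
  constructor
  · intro d hd; exact hnn d (List.mem_reverse.mp hd)
  · intro hp; obtain ⟨h, r, hr, hhp⟩ := hrev hp; exact ⟨h, r, hr, hhp⟩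

lemma get_digits_empty_of_nonpos (i : Int) (h : ¬ 0 < i) : get_digits i = [] := by
  rw [get_digits, get_digits_loop]
  simp [h]

lemma get_digits_alt_eq (i : Int) : get_digits_alt i = get_digits i := by
  rw [get_digits_alt, get_digits]
  congr 1
  suffices h : ∀ (n : Nat) (j : Int), j.toNat ≤ n → ∀ acc,
      get_digits_alt_loop j acc = get_digits_loop j acc by
    exact h i.toNat i le_rfl []
  intro n
  induction n with
  | zero =>
      intro j hj acc
      rw [get_digits_alt_loop, get_digits_loop]
      simp [show ¬ j > 0 by omega]
  | succ n ih =>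
      intro j hj acc
      rw [get_digits_alt_loop, get_digits_loop]
      by_cases hp : j > 0
      · have hd : PySem.Int.floordiv j 10 = j / 10 :=
          PySem.Int.floordiv_eq_ediv_of_pos (by omega)
        rw [dif_pos hp, dif_pos hp, ih]
        rw [hd]; omega
      · rw [dif_neg hp, dif_neg hp]

lemma sorted_id_iff_pairwise (ds : List Int) :
    (ds = PySem.List.sorted ds (fun x => x) false) ↔ ds.Pairwise (· ≤ ·) := by
  constructor
  · intro h
    have hp := PySem.List.sorted_pairwise ds (fun x => x)
    rw [← h] at hp
    simpa using hp
  · intro h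
    exact (PySem.List.sorted_eq_self_of_pairwise ds (fun x => x) (by simpa using h)).symm

-- ===== VERDICT (by name: the statement is the Claim_ definition above) =====
theorem check_part_1_spec : Claim_equal_check_part_1 := by
  intro i _
  unfold Spec_check_part_1
  rw [check_part_1, check_part_1_alt, get_digits_alt_eq, check_loop_eq]
  by_cases hp : 0 < i
  · obtain ⟨hnn, hhead⟩ := get_digits_spec i
    obtain ⟨h, r, hr, hhp⟩ := hhead hp
    rw [hr]
    simp only [List.drop_succ_cons, List.drop_zero]
    rw [zip_drop_eq_adjEq]
    rw [show adjEq 0 (h :: r) = (((0 : Int) == h) || adjEq h r) from rfl]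
    rw [show ascFrom 0 (h :: r) = if h < 0 then false else ascFrom h r from rfl]
    have hne : ((0 : Int) == h) = false := by simp; omega
    rw [if_neg (by omega), hne]
    have hsort : (decide ((h :: r) = PySem.List.sorted (h :: r) (fun x => x) false))
        = ascFrom h r := by
      by_cases hpw : (h :: r) = PySem.List.sorted (h :: r) (fun x => x) false
      · rw [decide_eq_true hpw,
          (ascFrom_iff_pairwise r h).mpr ((sorted_id_iff_pairwise _).mp hpw)]
      · rw [decide_eq_false hpw]
        by_cases ha : ascFrom h r = true
        · exact absurd ((sorted_id_iff_pairwise _).mpr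
            ((ascFrom_iff_pairwise r h).mp ha)) hpw
        · simp at ha; rw [ha]
    rw [hsort]
    simp
  · rw [get_digits_empty_of_nonpos i hp]
    simp [adjEq, ascFrom, PySem.List.sorted]
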